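-- pv_equiv track=rewrite | github.com/vmbx/writeups | 2024/USC-CTF-2024/crypto/unpopcorn/solve/solution.py | unpop
-- ===== SOURCE A (Python) =====
-- import string
--
-- def extended_gcd(a, b):
--     if b == 0:
--         return a, 1, 0
--     gcd, x1, y1 = extended_gcd(b, a % b)
--     x = y1
--     y = x1 - (a // b) * y1
--     return gcd, x, y
--
-- def mod_inverse(p, m):
--     gcd, x, y = extended_gcd(p, m)
--     if gcd != 1:
--         return None
--     else:
--         return x % m
--
-- def unpop(message_hex, p, m):
--     message = [int(x, 16) for x in message_hex.split()]
--
--     n = len(message)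
--     half = n // 2
--     message = message[half:] + message[:half]
--     message = [(x >> 3) for x in message]
--
--     p_inv = mod_inverse(p, m)
--     if p_inv is None:
--         return None
--
--     message = [(x * p_inv % m) for x in message]
--
--     original_message = ''.join(chr(x ^ 42) for x in message)
--
--     if all(c in string.printable for c in original_message):
--         return original_message
--     else:
--         return None
-- ===== SOURCE B (Python) =====
-- def unpop(message_hex, p, m):
--     # iterative extended Euclid: invariant keeps (old_r, r) and Bezout coeffs (old_s, s)
--     old_r, r = p, m
--     old_s, s = 1, 0
--     while r != 0:
--         q = old_r // r
--         old_r, r = r, old_r - q * r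
--         old_s, s = s, old_s - q * s
--     if old_r != 1:
--         return None
--     p_inv = old_s % m
--
--     tokens = message_hex.split()
--     half = len(tokens) // 2
--     out = []
--     for t in tokens[half:] + tokens[:half]:
--         c = ((int(t, 16) >> 3) * p_inv % m) ^ 42
--         if not (32 <= c <= 126 or 9 <= c <= 13):
--             return None
--         out.append(chr(c))
--     return ''.join(out)
-- ===== Notes on version B (the rewrite author's own statement) =====
-- stated objective: simpler
-- what changed: mod_inverse's recursive extended_gcd becomes the iterative extended-Euclid loop (computed once, up front, with an early None return), and A's four list comprehensions plus join plus the trailing all-printable check are fused into a single early-exit pass over the rotated token list that parses, transforms and printable-checks each character as it is built.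
import Mathlib
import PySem

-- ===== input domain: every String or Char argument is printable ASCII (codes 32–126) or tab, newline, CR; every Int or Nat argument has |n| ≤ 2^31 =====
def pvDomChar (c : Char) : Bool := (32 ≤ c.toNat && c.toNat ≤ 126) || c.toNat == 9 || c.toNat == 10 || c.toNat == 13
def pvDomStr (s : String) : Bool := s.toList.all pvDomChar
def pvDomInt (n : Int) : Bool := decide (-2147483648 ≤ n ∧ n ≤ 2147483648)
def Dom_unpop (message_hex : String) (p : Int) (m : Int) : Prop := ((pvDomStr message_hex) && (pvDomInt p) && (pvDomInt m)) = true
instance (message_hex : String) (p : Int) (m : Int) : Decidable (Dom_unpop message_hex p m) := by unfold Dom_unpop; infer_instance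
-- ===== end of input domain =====

-- B replaces A's recursive extended_gcd by the iterative extended-Euclid loop and fuses
-- A's four list passes + join + printable check into one early-exit pass over the rotated
-- tokens (objective: simpler / alternative decomposition; same asymptotic cost).

-- Termination lemma for both Euclid recursions (Python %: sign of the divisor).
theorem pv_mod_natAbs_lt (a b : Int) (hb : b ≠ 0) : (PySem.Int.mod a b).natAbs < b.natAbs := by
  rcases lt_or_gt_of_ne hb with h | h
  · have h1 := (PySem.Int.mod_neg_bounds a h).1
    have h2 := (PySem.Int.mod_neg_bounds a h).2
    omega
  · have h1 := PySem.Int.mod_nonneg a h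
    have h2 := PySem.Int.mod_lt a h
    omega

-- ===== PORT A =====

-- extended_gcd(a, b) — literal recursive port; a % b, a // b are Python floor mod/div.
def pyEgcd (a b : Int) : Int × Int × Int :=
  if _h : b = 0 then (a, 1, 0)
  else
    let r := pyEgcd b (PySem.Int.mod a b)
    (r.1, r.2.2, r.2.1 - (PySem.Int.floordiv a b) * r.2.2)
termination_by b.natAbs
decreasing_by exact pv_mod_natAbs_lt a b _h

-- mod_inverse(p, m); 'x % m' with m = 0 raises ZeroDivisionError in Python (excluded by Pre_),
-- here PySem.Int.mod is total.
def pyModInverse (p m : Int) : Option Int :=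
  let g := pyEgcd p m
  if g.1 ≠ 1 then none else some (PySem.Int.mod g.2.1 m)

-- int(t, 16) for each whitespace token; ValueError (= none) on a bad token, excluded by Pre_.
def parseAll : List String → Option (List Int)
  | [] => some []
  | t :: ts =>
    match PySem.Int.ofStrBase? t 16 with
    | none => none
    | some x =>
      match parseAll ts with
      | none => none
      | some xs => some (x :: xs)

-- 'c in string.printable' on the character's code: string.printable is exactly codes 32..126 and 9..13.
def pyPrintableCode (c : Int) : Bool := (32 ≤ c && c ≤ 126) || (9 ≤ c && c ≤ 13)

-- Port of A. Python's chr(x ^ 42) raises ValueError outside [0, 0x110000) — excluded by Pre_;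
-- within Pre_ every code the string is actually built from is printable ASCII, so Char.ofNat is exact.
def unpop (message_hex : String) (p : Int) (m : Int) : Option String :=
  match parseAll (PySem.Str.split₀ message_hex) with
  | none => none
  | some message =>
    let n : Int := (message.length : Int)
    let half := PySem.Int.floordiv n 2
    let message := PySem.List.slice message (some half) none ++ PySem.List.slice message none (some half)
    let message := message.map (fun x => PySem.Int.floordiv x 8)  -- x >> 3 (floor shift)
    match pyModInverse p m with
    | none => none
    | some pinv =>
      let message := message.map (fun x => PySem.Int.mod (x * pinv) m)
      let codes := message.map (fun x => PySem.Int.bxor x 42)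
      if codes.all pyPrintableCode then
        some (String.mk (codes.map (fun c => Char.ofNat c.toNat)))
      else none

-- ===== PORT B =====

-- while r != 0: q = old_r // r; (old_r, r), (old_s, s) updated simultaneously.
def egcdLoop (oldr r olds s : Int) : Int × Int :=
  if _h : r = 0 then (oldr, olds)
  else
    let q := PySem.Int.floordiv oldr r
    egcdLoop r (oldr - q * r) s (olds - q * s)
termination_by r.natAbs
decreasing_by
  have hm := PySem.Int.floordiv_mul_add_mod oldr r
  have : oldr - PySem.Int.floordiv oldr r * r = PySem.Int.mod oldr r := by omega
  rw [this]
  exact pv_mod_natAbs_lt oldr r _h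

-- the single pass of B: parse, transform, printable-check and collect each char, early None.
def buildB (pinv m : Int) : List String → Option (List Char)
  | [] => some []
  | t :: ts =>
    match PySem.Int.ofStrBase? t 16 with
    | none => none  -- int(t, 16) ValueError, excluded by Pre_
    | some x =>
      let c := PySem.Int.bxor (PySem.Int.mod (PySem.Int.floordiv x 8 * pinv) m) 42
      if (32 ≤ c ∧ c ≤ 126) ∨ (9 ≤ c ∧ c ≤ 13) then
        match buildB pinv m ts with
        | none => none
        | some cs => some (Char.ofNat c.toNat :: cs)
      else none

def unpop_alt (message_hex : String) (p : Int) (m : Int) : Option String :=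
  let e := egcdLoop p m 1 0
  if e.1 ≠ 1 then none
  else
    let pinv := PySem.Int.mod e.2 m  -- old_s % m (m = 0 raises in Python, excluded by Pre_)
    let tokens := PySem.Str.split₀ message_hex
    let half := tokens.length / 2
    match buildB pinv m (tokens.drop half ++ tokens.take half) with
    | none => none
    | some cs => some (String.mk cs)

-- ===== PRECONDITION & SPEC =====
-- Pre_ excludes EXACTLY the inputs on which Python A raises, nothing else: a token int(·,16)
-- rejects (ValueError); p = 1 ∧ m = 0 (ZeroDivisionError in x % m); and the chr ValueError
-- region — A only reaches chr when m > 0 and gcd(p,m) = 1, its inverse is then the canonical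
-- residue of the Bezout coefficient Int.gcdA p m, and chr raises iff some transformed code
-- reaches 0x110000 (codes are ≥ 0 there since m > 0).
def Pre_unpop (message_hex : String) (p : Int) (m : Int) : Prop :=
  (∀ t ∈ PySem.Str.split₀ message_hex, (PySem.Int.ofStrBase? t 16).isSome = true)
  ∧ ¬ (p = 1 ∧ m = 0)
  ∧ (m ≤ 0 ∨ Int.gcd p m ≠ 1 ∨
      ∀ t ∈ PySem.Str.split₀ message_hex,
        PySem.Int.bxor
          (PySem.Int.mod (PySem.Int.floordiv ((PySem.Int.ofStrBase? t 16).getD 0) 8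
                            * PySem.Int.mod (Int.gcdA p m) m) m) 42 < 0x110000)
instance (message_hex : String) (p : Int) (m : Int) : Decidable (Pre_unpop message_hex p m) := by
  unfold Pre_unpop; infer_instance

def pvWitness_unpop : String × Int × Int := ("1f 2a", 3, 7)

def Spec_unpop (message_hex : String) (p : Int) (m : Int) (out : Option String) : Prop := out = unpop_alt message_hex p m
instance (message_hex : String) (p : Int) (m : Int) (out : Option String) : Decidable (Spec_unpop message_hex p m out) := by unfold Spec_unpop; infer_instance

-- ===== CLAIM (what is proved, stated in full; the proofs are below) =====
def Claim_equal_unpop : Prop := ∀ (message_hex : String) (p : Int) (m : Int), Dom_unpop message_hex p m → Pre_unpop message_hex p m → Spec_unpop message_hex p m (unpop message_hex p m)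

-- ===== LEMMAS AND PROOFS =====

-- the iterative loop computes A's recursive gcd and Bezout coefficient
theorem egcdLoop_eq (r0 r1 s0 s1 : Int) :
    egcdLoop r0 r1 s0 s1 = ((pyEgcd r0 r1).1, (pyEgcd r0 r1).2.1 * s0 + (pyEgcd r0 r1).2.2 * s1) := by
  fun_induction egcdLoop r0 r1 s0 s1
  case case1 =>
    rw [pyEgcd]; simp [*]
  case case2 =>
    rename_i oldr r olds s h q ih
    have hq : q = PySem.Int.floordiv oldr r := rfl
    have hm : oldr - q * r = PySem.Int.mod oldr r := by
      rw [hq]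
      have := PySem.Int.floordiv_mul_add_mod oldr r; omega
    rw [pyEgcd]; simp only [h, dite_false]
    rw [hm] at ih ⊢
    rw [ih, Prod.mk.injEq]
    refine ⟨rfl, by rw [hq]; ring⟩

theorem parseAll_length (ts : List String) (xs : List Int) (h : parseAll ts = some xs) :
    xs.length = ts.length := by
  induction ts generalizing xs with
  | nil => rw [parseAll] at h; cases h; rfl
  | cons t ts ih =>
    rw [parseAll] at h
    cases hp : PySem.Int.ofStrBase? t 16 with
    | none => simp [hp] at h
    | some x =>
      cases hr : parseAll ts with
      | none => simp [hp, hr] at h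
      | some ys => simp [hp, hr] at h; simp [← h, ih ys hr]

theorem parseAll_take_drop (ts : List String) (xs : List Int) (k : Nat) (h : parseAll ts = some xs) :
    parseAll (ts.take k) = some (xs.take k) ∧ parseAll (ts.drop k) = some (xs.drop k) := by
  induction ts generalizing xs k with
  | nil => rw [parseAll] at h; cases h; simp [parseAll]
  | cons t ts ih =>
    rw [parseAll] at h
    cases hp : PySem.Int.ofStrBase? t 16 with
    | none => simp [hp] at h
    | some x =>
      cases hr : parseAll ts with
      | none => simp [hp, hr] at h
      | some ys =>
        simp only [hp, hr] at h
        cases h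
        cases k with
        | zero => simp [parseAll, hp, hr]
        | succ k =>
          obtain ⟨h1, h2⟩ := ih ys k hr
          simp [parseAll, hp, h1, h2]

theorem parseAll_append (l1 l2 : List String) (x1 x2 : List Int)
    (h1 : parseAll l1 = some x1) (h2 : parseAll l2 = some x2) :
    parseAll (l1 ++ l2) = some (x1 ++ x2) := by
  induction l1 generalizing x1 with
  | nil => rw [parseAll] at h1; cases h1; simpa using h2
  | cons t ts ih =>
    rw [parseAll] at h1
    cases hp : PySem.Int.ofStrBase? t 16 with
    | none => simp [hp] at h1
    | some x =>
      cases hr : parseAll ts with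
      | none => simp [hp, hr] at h1
      | some ys =>
        simp only [hp, hr] at h1
        cases h1
        simp [parseAll, hp, ih ys hr]

theorem buildB_none (pinv m : Int) (ts : List String) (t : String)
    (ht : t ∈ ts) (h : PySem.Int.ofStrBase? t 16 = none) : buildB pinv m ts = none := by
  induction ts with
  | nil => cases ht
  | cons u us ih =>
    rw [buildB]
    rcases List.mem_cons.mp ht with rfl | hmem
    · simp [h]
    · cases hp : PySem.Int.ofStrBase? u 16 with
      | none => rfl
      | some x => simp only [ih hmem]; split <;> rfl

theorem parseAll_none (ts : List String) (h : parseAll ts = none) :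
    ∃ t ∈ ts, PySem.Int.ofStrBase? t 16 = none := by
  induction ts with
  | nil => simp [parseAll] at h
  | cons t ts ih =>
    rw [parseAll] at h
    cases hp : PySem.Int.ofStrBase? t 16 with
    | none => exact ⟨t, List.mem_cons_self, hp⟩
    | some x =>
      cases hr : parseAll ts with
      | none =>
        obtain ⟨u, hu, hn⟩ := ih hr
        exact ⟨u, List.mem_cons_of_mem _ hu, hn⟩
      | some ys => simp [hp, hr] at h

theorem buildB_eq (pinv m : Int) (ts : List String) (xs : List Int) (h : parseAll ts = some xs) :
    buildB pinv m ts =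
      (if (xs.map (fun x => PySem.Int.bxor (PySem.Int.mod (PySem.Int.floordiv x 8 * pinv) m) 42)).all pyPrintableCode
       then some ((xs.map (fun x => PySem.Int.bxor (PySem.Int.mod (PySem.Int.floordiv x 8 * pinv) m) 42)).map (fun c => Char.ofNat c.toNat))
       else none) := by
  induction ts generalizing xs with
  | nil => rw [parseAll] at h; cases h; simp [buildB]
  | cons t ts ih =>
    rw [parseAll] at h
    cases hp : PySem.Int.ofStrBase? t 16 with
    | none => simp [hp] at h
    | some x =>
      cases hr : parseAll ts with
      | none => simp [hp, hr] at h
      | some ys =>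
        simp only [hp, hr] at h
        cases h
        rw [buildB]
        simp only [hp]
        rw [ih ys hr, List.map_cons, List.all_cons]
        have hcp : ∀ c : Int, pyPrintableCode c = true ↔ ((32 ≤ c ∧ c ≤ 126) ∨ (9 ≤ c ∧ c ≤ 13)) := by
          intro c; simp [pyPrintableCode]
        by_cases h1 : (32 ≤ PySem.Int.bxor (PySem.Int.mod (PySem.Int.floordiv x 8 * pinv) m) 42 ∧ PySem.Int.bxor (PySem.Int.mod (PySem.Int.floordiv x 8 * pinv) m) 42 ≤ 126) ∨ (9 ≤ PySem.Int.bxor (PySem.Int.mod (PySem.Int.floordiv x 8 * pinv) m) 42 ∧ PySem.Int.bxor (PySem.Int.mod (PySem.Int.floordiv x 8 * pinv) m) 42 ≤ 13)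
        · have hct : pyPrintableCode (PySem.Int.bxor (PySem.Int.mod (PySem.Int.floordiv x 8 * pinv) m) 42) = true := (hcp _).mpr h1
          rw [if_pos h1, hct, Bool.true_and]
          cases hall : (List.map (fun x => PySem.Int.bxor (PySem.Int.mod (PySem.Int.floordiv x 8 * pinv) m) 42) ys).all pyPrintableCode
          · rfl
          · rw [List.map_cons]; rfl
        · have hcf : pyPrintableCode (PySem.Int.bxor (PySem.Int.mod (PySem.Int.floordiv x 8 * pinv) m) 42) = false := by
            rw [← Bool.not_eq_true, hcp]; exact h1
          rw [if_neg h1, hcf, Bool.false_and]; rfl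

theorem rot_mem {α : Type} (l : List α) (k : Nat) (t : α) (ht : t ∈ l) :
    t ∈ l.drop k ++ l.take k := by
  rw [List.mem_append, or_comm, ← List.mem_append, List.take_append_drop]
  exact ht

-- ===== VERDICT (by name: the statement is the Claim_ definition above) =====
theorem unpop_spec : Claim_equal_unpop := by
  intro msg p m _hd _hpre
  unfold Spec_unpop
  have hE : egcdLoop p m 1 0 = ((pyEgcd p m).1, (pyEgcd p m).2.1) := by
    rw [egcdLoop_eq]; norm_num
  unfold unpop unpop_alt pyModInverse
  rw [hE]
  by_cases hg : (pyEgcd p m).1 = 1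
  · cases hps : parseAll (PySem.Str.split₀ msg) with
    | none =>
      obtain ⟨t, ht, hn⟩ := parseAll_none _ hps
      have hb := buildB_none (PySem.Int.mod (pyEgcd p m).2.1 m) m _ t
        (rot_mem _ ((PySem.Str.split₀ msg).length / 2) t ht) hn
      simp [hg, hb]
    | some xs =>
      have hlen : xs.length = (PySem.Str.split₀ msg).length := parseAll_length _ _ hps
      have htd := parseAll_take_drop (PySem.Str.split₀ msg) xs ((PySem.Str.split₀ msg).length / 2) hps
      have hrot := parseAll_append _ _ _ _ htd.2 htd.1
      have hhalf : PySem.Int.floordiv (((PySem.Str.split₀ msg).length : Nat) : Int) 2 = (((PySem.Str.split₀ msg).length / 2 : Nat) : Int) := by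
        exact_mod_cast PySem.Int.floordiv_natCast (PySem.Str.split₀ msg).length 2
      simp only [hhalf, hlen, hg, PySem.List.slice_from_natCast, PySem.List.slice_to_natCast,
        List.map_map, Function.comp_def, ne_eq, not_true_eq_false, ite_false]
      rw [buildB_eq _ _ _ _ hrot]
      split <;> simp [List.map_map, Function.comp_def]
  · cases hps : parseAll (PySem.Str.split₀ msg) <;> simp [hg]
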